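-- pv_equiv track=rewrite | github.com/botij0/katas | python/password-creator/main.py | update_string
-- ===== SOURCE A (Python) =====
-- INVALID_NUMS = [105, 108, 111]
--
-- def update_string(char_list: list) -> str:
--     for i in range(len(char_list) - 1, -1, -1):
--         if char_list[i] > 122:
--             char_list[i] = 97
--             char_list[i - 1] += 1
--
--         if char_list[i] in INVALID_NUMS:
--             char_list[i] += 1
--             char_list = reset_chars(char_list, i + 1)
--
--     return char_list
--
-- def reset_chars(char_list: list, index: int) -> list:
--     for i in range(index, len(char_list)):
--         char_list[i] = 97
--
--     return char_list
-- ===== SOURCE B (Python) =====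
-- def update_string(char_list: list) -> str:
--     acc = []        # values for the processed suffix, rightmost first
--     n97 = 0         # count of trailing positions forced to 97 by the latest reset
--     carry = 0
--     for v in reversed(char_list):
--         v += carry
--         carry = 1 if v > 122 else 0
--         if v > 122:
--             v = 97
--         if v in (105, 108, 111):
--             n97 += len(acc)
--             acc = [v + 1]
--         else:
--             acc.append(v)
--     acc.reverse()
--     return acc + [97] * n97
-- ===== Notes on version B (the rewrite author's own statement) =====
-- stated objective: alternative
-- what changed: A mutates the list in place, re-reading it by index and re-running a reset loop over the whole suffix at every invalid hit (quadratic worst case); B is one pure right-to-left pass carrying the overflow bit and a deferred count of reset positions, appending the reset fill of 97s once at the end, and it drops a carry that overflows past index 0 instead of wrapping it onto the last element.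
-- intended difference: On lists whose leading run of elements >= 122 contains one > 122, the carry overflows past index 0 and A's 'char_list[i-1] += 1' at i=0 wraps to index -1, incrementing the already-final last element, so A's result ends one higher than B's; B drops the outgoing carry, the intended behaviour, since the wraparound is an accident of Python negative indexing. — e.g. on update_string([123]): A returns [98], B returns [97]
import Mathlib
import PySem

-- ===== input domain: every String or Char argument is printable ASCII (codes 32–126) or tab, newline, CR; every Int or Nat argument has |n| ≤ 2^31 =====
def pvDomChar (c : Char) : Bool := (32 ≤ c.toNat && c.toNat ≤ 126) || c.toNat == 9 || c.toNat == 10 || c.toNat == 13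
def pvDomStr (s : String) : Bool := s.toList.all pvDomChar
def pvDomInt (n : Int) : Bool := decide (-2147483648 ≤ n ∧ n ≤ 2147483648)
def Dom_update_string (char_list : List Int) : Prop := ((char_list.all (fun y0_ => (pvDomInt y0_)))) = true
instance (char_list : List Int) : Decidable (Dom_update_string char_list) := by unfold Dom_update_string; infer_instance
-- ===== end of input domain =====

-- B replaces A's per-trigger suffix resets and in-place index mutation by one right-to-left pass with
-- a carry and a deferred reset count; equivalence is about the RETURN value only — Python A mutates
-- its argument in place, B builds a fresh list.

-- ===== PORT A =====
def INVALID_NUMS : List Int := [105, 108, 111]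

-- reset_chars(char_list, index): for i in range(index, len(char_list)): char_list[i] = 97
def reset_chars (char_list : List Int) (index : Int) : List Int :=
  (PySem.List.pyRange index (char_list.length : Int) 1).foldl
    (fun l i => PySem.List.pySetD l i 97) char_list

-- one iteration of A's loop body at index i
def update_string_step (l : List Int) (i : Int) : List Int :=
  let l1 :=
    if PySem.List.pyGetD l i 0 > 122 then
      let l' := PySem.List.pySetD l i 97
      PySem.List.pySetD l' (i - 1) (PySem.List.pyGetD l' (i - 1) 0 + 1)
    else l
  if INVALID_NUMS.contains (PySem.List.pyGetD l1 i 0) then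
    reset_chars (PySem.List.pySetD l1 i (PySem.List.pyGetD l1 i 0 + 1)) (i + 1)
  else l1

-- for i in range(len(char_list) - 1, -1, -1): fuel k + 1 means index k is processed next
def update_string_loop (l : List Int) : Nat → List Int
  | 0 => l
  | k + 1 => update_string_loop (update_string_step l (k : Int)) k

def update_string (char_list : List Int) : List Int :=
  update_string_loop char_list char_list.length

-- ===== PORT B =====
-- one iteration of B's loop body: state (acc, n97, carry), element v0 (taken right-to-left)
def update_string_alt_step (st : List Int × Nat × Int) (v0 : Int) : List Int × Nat × Int :=
  let acc := st.1
  let n97 := st.2.1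
  let v1 := v0 + st.2.2
  let carry : Int := if v1 > 122 then 1 else 0
  let v2 := if v1 > 122 then (97 : Int) else v1
  if ([105, 108, 111] : List Int).contains v2 then
    ([v2 + 1], n97 + acc.length, carry)
  else
    (acc ++ [v2], n97, carry)

def update_string_alt (char_list : List Int) : List Int :=
  let st := char_list.reverse.foldl update_string_alt_step ([], 0, 0)
  st.1.reverse ++ List.replicate st.2.1 97

-- ===== PRECONDITION & SPEC =====
-- On inputs whose leading elements are all ≥ 122 up to one that is > 122, the overflow carry walks off
-- index 0: A's 'char_list[i - 1] += 1' at i = 0 hits index -1 and silently increments the already-final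
-- LAST element (Python negative-index wraparound); B drops the carry that leaves the string, the
-- intended behaviour for a wrap-around increment, so A's last element is one greater than B's there.
def D_update_string (char_list : List Int) : Prop :=
  ((char_list.takeWhile (fun v => 122 ≤ v)).any (fun v => 122 < v)) = true
instance (char_list : List Int) : Decidable (D_update_string char_list) := by
  unfold D_update_string; infer_instance

def Spec_update_string (char_list : List Int) (out : List Int) : Prop :=
  ¬ D_update_string char_list → out = update_string_alt char_list
instance (char_list : List Int) (out : List Int) : Decidable (Spec_update_string char_list out) := by
  unfold Spec_update_string; infer_instance

def pvDiffWitness_update_string : List Int := [123]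
def pvDiffWitnessOut_update_string : (List Int) × (List Int) := ([98], [97])

-- ===== CLAIM (what is proved, stated in full; the proofs are below) =====
def Claim_unchanged_update_string : Prop :=
  ∀ (char_list : List Int), Dom_update_string char_list →
    Spec_update_string char_list (update_string char_list)
def Claim_changed_update_string : Prop :=
  Dom_update_string (pvDiffWitness_update_string) ∧
  D_update_string (pvDiffWitness_update_string) ∧
  update_string (pvDiffWitness_update_string) = pvDiffWitnessOut_update_string.1 ∧
  update_string_alt (pvDiffWitness_update_string) = pvDiffWitnessOut_update_string.2 ∧
  pvDiffWitnessOut_update_string.1 ≠ pvDiffWitnessOut_update_string.2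
def Claim_exact_update_string : Prop :=
  ∀ (char_list : List Int), Dom_update_string char_list → D_update_string char_list →
    update_string char_list ≠ update_string_alt char_list

-- ===== LEMMAS AND PROOFS =====

-- the common functional core: right-to-left carry/invalid/reset recursion,
-- returning (carry out of index 0, resulting values)
def fcore : List Int → Int × List Int
  | [] => (0, [])
  | x :: xs =>
    let p := fcore xs
    let v := x + p.1
    if v > 122 then (1, 97 :: p.2)
    else if ([105, 108, 111] : List Int).contains v then
      (0, (v + 1) :: p.2.map (fun _ => (97 : Int)))
    else (0, v :: p.2)

theorem fcore_carry01 (a : List Int) : (fcore a).1 = 0 ∨ (fcore a).1 = 1 := by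
  induction a with
  | nil => exact Or.inl rfl
  | cons x xs ih => simp only [fcore]; split_ifs <;> simp

theorem fcore_carry_iff (a : List Int) : (fcore a).1 = 1 ↔ D_update_string a := by
  induction a with
  | nil => simp [fcore, D_update_string]
  | cons x xs ih =>
    unfold D_update_string at *
    rcases fcore_carry01 xs with h0 | h1
    · by_cases hx : x + (fcore xs).1 > 122
      · have hx' : (122 : Int) < x := by omega
        simp [fcore, hx, List.takeWhile_cons, show (122:Int) ≤ x by omega, hx']
      · have : ¬ (122 < x) := by omega
        simp only [fcore]
        rw [if_neg hx]
        by_cases hinv : ([105, 108, 111] : List Int).contains (x + (fcore xs).1)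
        · simp only [if_pos hinv]
          by_cases hle : (122 : Int) ≤ x
          · simp [List.takeWhile_cons, hle, this, ← ih, h0]
          · simp [List.takeWhile_cons, hle]
        · simp only [if_neg hinv]
          by_cases hle : (122 : Int) ≤ x
          · simp [List.takeWhile_cons, hle, this, ← ih, h0]
          · simp [List.takeWhile_cons, hle]
    · by_cases hx : x + (fcore xs).1 > 122
      · have hle : (122 : Int) ≤ x := by omega
        simp only [fcore]
        rw [if_pos hx]
        simp only [List.takeWhile_cons]
        simp [hle, ← ih, h1]
      · have hlt : ¬ ((122:Int) ≤ x) := by omega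
        simp only [fcore]
        rw [if_neg hx]
        simp only [List.takeWhile_cons]
        split_ifs <;> simp_all <;> omega

theorem foldB_eq_fcore (a : List Int) :
    (a.reverse.foldl update_string_alt_step ([], 0, 0)).1.reverse ++
      List.replicate (a.reverse.foldl update_string_alt_step ([], 0, 0)).2.1 (97 : Int)
      = (fcore a).2 ∧
    (a.reverse.foldl update_string_alt_step ([], 0, 0)).2.2 = (fcore a).1 := by
  induction a with
  | nil => simp [fcore]
  | cons x xs ih =>
    obtain ⟨ih1, ih2⟩ := ih
    rw [List.reverse_cons, List.foldl_append]
    set st := xs.reverse.foldl update_string_alt_step ([], 0, 0) with hst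
    obtain ⟨acc, n97, c⟩ := st
    simp only at ih1 ih2
    simp only [List.foldl_cons, List.foldl_nil]
    unfold update_string_alt_step
    simp only [fcore, ← ih2]
    by_cases hgt : x + c > 122
    · simp only [if_pos hgt]
      norm_num
      exact ih1
    · simp only [if_neg hgt]
      by_cases hinv : ([105, 108, 111] : List Int).contains (x + c)
      · simp only [if_pos hinv]
        norm_num [hgt]
        rw [← ih1]
        simp
        omega
      · simp only [if_neg hinv]
        norm_num [hgt, hinv]
        exact ih1

theorem fcore_length (a : List Int) : (fcore a).2.length = a.length := by
  induction a with
  | nil => rfl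
  | cons x xs ih => simp only [fcore]; split_ifs <;> simp [ih]

theorem getD_append_length (pre r : List Int) (x d : Int) :
    (pre ++ x :: r).getD pre.length d = x := by
  induction pre with
  | nil => rfl
  | cons y ys ih => simpa using ih

theorem set_append_length (pre r : List Int) (x v : Int) :
    (pre ++ x :: r).set pre.length v = pre ++ v :: r := by
  induction pre with
  | nil => rfl
  | cons y ys ih => simpa using ih

theorem take_succ_set : ∀ (idx : Nat) (l : List Int), idx < l.length →
    (l.set idx (97 : Int)).take (idx + 1) = l.take idx ++ [(97 : Int)] := by
  intro idx
  induction idx with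
  | zero => intro l h; cases l <;> simp_all
  | succ n ih =>
    intro l h
    cases l with
    | nil => simp at h
    | cons y ys => simp [List.set_cons_succ, List.take_succ_cons, ih ys (by simp at h; omega)]

theorem reset_fold (k : Nat) : ∀ (l : List Int) (idx : Nat), l.length = idx + k →
    (PySem.List.pyRange (idx : Int) ((idx : Int) + (k : Int)) 1).foldl
      (fun l i => PySem.List.pySetD l i 97) l
    = l.take idx ++ List.replicate k (97 : Int) := by
  induction k with
  | zero =>
    intro l idx h
    rw [show ((idx:Int) + ((0:Nat):Int)) = (idx:Int) by push_cast; ring,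
        PySem.List.pyRange_one_eq_nil (by omega)]
    simp [List.take_of_length_le (by omega : l.length ≤ idx)]
  | succ k ih =>
    intro l idx h
    rw [PySem.List.pyRange_one_cons (by omega)]
    simp only [List.foldl_cons]
    rw [PySem.List.pySetD_natCast]
    have h1 : ((idx : Int) + 1) = ((idx + 1 : Nat) : Int) := by push_cast; ring
    have h2 : ((idx : Int) + (k + 1 : Nat)) = ((idx + 1 : Nat) : Int) + (k : Nat) := by push_cast; ring
    rw [h1, h2, ih (l.set idx 97) (idx + 1) (by simp; omega)]
    rw [take_succ_set idx l (by omega)]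
    simp [List.replicate_succ]

theorem reset_chars_spec (l : List Int) (idx : Nat) (h : idx ≤ l.length) :
    reset_chars l (idx : Int) = l.take idx ++ List.replicate (l.length - idx) (97 : Int) := by
  unfold reset_chars
  have : ((l.length : Nat) : Int) = (idx : Int) + ((l.length - idx : Nat) : Int) := by omega
  rw [this, reset_fold (l.length - idx) l idx (by omega)]

theorem pySetD_neg_one (l : List Int) (h : l ≠ []) (v : Int) :
    PySem.List.pySetD l (-1) v = l.set (l.length - 1) v := by
  have hl : 0 < l.length := List.length_pos_iff.mpr h
  simp [PySem.List.pySetD, PySem.List.pySet?, PySem.List.pyIdx?]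
  rw [if_pos (by omega : 1 ≤ l.length)]
  rfl

-- base case of the main induction
theorem loopA_base (x : Int) (suf : List Int) :
    update_string_loop ([] ++ (x + (fcore suf).1) :: (fcore suf).2) (List.length ([] : List Int) + 1)
      = (if (fcore ([] ++ x :: suf)).1 = 0 then (fcore ([] ++ x :: suf)).2
         else PySem.List.pySetD (fcore ([] ++ x :: suf)).2 (-1)
                (PySem.List.pyGetD (fcore ([] ++ x :: suf)).2 (-1) 0 + 1)) := by
  simp only [List.nil_append, List.length_nil, Nat.zero_add]
  set c := (fcore suf).1
  set r := (fcore suf).2 with hr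
  simp only [update_string_loop]
  unfold update_string_step
  rw [show ((0 : Nat) : Int) = (0 : Int) by norm_num]
  rw [PySem.List.pyGetD_zero_cons]
  by_cases hgt : x + c > 122
  · rw [if_pos hgt]
    have hset0 : PySem.List.pySetD ((x + c) :: r) 0 97 = (97 : Int) :: r := by
      simp [PySem.List.pySetD, PySem.List.pySet?, PySem.List.pyIdx?]
    rw [hset0]
    have hfc : fcore (x :: suf) = (1, 97 :: r) := by
      simp only [fcore]; rw [if_pos hgt]
    rw [hfc]
    simp only
    norm_num
    intro hmem
    exfalso
    rcases hr2 : r with _ | ⟨z, zs⟩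
    · rw [hr2] at hmem
      norm_num [PySem.List.pySetD, PySem.List.pySet?, PySem.List.pyIdx?,
        PySem.List.pyGetD, PySem.List.pyGet?, INVALID_NUMS] at hmem
    · rw [hr2] at hmem
      rw [pySetD_neg_one (97 :: z :: zs) (by simp) _] at hmem
      simp only [List.length_cons] at hmem
      rw [show zs.length + 1 + 1 - 1 = zs.length + 1 by omega] at hmem
      simp [INVALID_NUMS, PySem.List.pyGetD, PySem.List.pyGet?, PySem.List.pyIdx?,
        show (0:Int) ≤ (zs.length:Int) + 1 by positivity] at hmem
  · rw [if_neg hgt]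
    simp only [PySem.List.pyGetD_zero_cons]
    by_cases hinv : INVALID_NUMS.contains (x + c)
    · rw [if_pos hinv]
      have hset0 : PySem.List.pySetD ((x + c) :: r) 0 (x + c + 1) = (x + c + 1) :: r := by
        simp [PySem.List.pySetD, PySem.List.pySet?, PySem.List.pyIdx?]
      rw [hset0]
      rw [show ((0:Int) + 1) = ((1 : Nat) : Int) by norm_num]
      rw [reset_chars_spec ((x + c + 1) :: r) 1 (by simp)]
      have hfc : fcore (x :: suf) = (0, (x + c + 1) :: r.map (fun _ => (97:Int))) := by
        simp only [fcore]
        rw [if_neg hgt, if_pos (by simpa [INVALID_NUMS] using hinv)]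
      rw [hfc]
      simp [List.map_const']
    · rw [if_neg hinv]
      have hfc : fcore (x :: suf) = (0, (x + c) :: r) := by
        simp only [fcore]
        rw [if_neg hgt, if_neg (by simpa [INVALID_NUMS] using hinv)]
      rw [hfc]
      norm_num

theorem update_string_loop_succ (l : List Int) (k : Nat) :
    update_string_loop l (k + 1) = update_string_loop (update_string_step l (k : Int)) k := rfl

theorem take_append_succ (P r : List Int) (w : Int) :
    (P ++ w :: r).take (P.length + 1) = P ++ [w] := by
  induction P with
  | nil => simp
  | cons p ps ih => simpa using ih

theorem loopA_sim (pre : List Int) :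
    ∀ (x : Int) (suf : List Int),
      update_string_loop (pre ++ (x + (fcore suf).1) :: (fcore suf).2) (pre.length + 1)
        = (if (fcore (pre ++ x :: suf)).1 = 0 then (fcore (pre ++ x :: suf)).2
           else PySem.List.pySetD (fcore (pre ++ x :: suf)).2 (-1)
                  (PySem.List.pyGetD (fcore (pre ++ x :: suf)).2 (-1) 0 + 1)) := by
  induction pre using List.reverseRecOn with
  | nil => exact loopA_base
  | append_singleton pre' y ih =>
    intro x suf
    set c := (fcore suf).1 with hc
    set r := (fcore suf).2 with hr
    have hL : (pre' ++ [y]).length = pre'.length + 1 := by simp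
    rw [hL, update_string_loop_succ]
    unfold update_string_step
    have hG1 : PySem.List.pyGetD ((pre' ++ [y]) ++ (x + c) :: r) ((pre'.length + 1 : Nat) : Int) 0 = x + c := by
      rw [PySem.List.pyGetD_natCast, ← hL, getD_append_length]
    simp only [hG1]
    by_cases hgt : x + c > 122
    · simp only [if_pos hgt]
      have hS1 : PySem.List.pySetD ((pre' ++ [y]) ++ (x + c) :: r) ((pre'.length + 1 : Nat) : Int) 97
          = (pre' ++ [y]) ++ (97 : Int) :: r := by
        rw [PySem.List.pySetD_natCast, ← hL, set_append_length]
      simp only [hS1]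
      have hcast : ((pre'.length + 1 : Nat) : Int) - 1 = ((pre'.length : Nat) : Int) := by push_cast; ring
      have hassoc : (pre' ++ [y]) ++ (97 : Int) :: r = pre' ++ y :: (97 : Int) :: r := by simp
      have hG2 : PySem.List.pyGetD ((pre' ++ [y]) ++ (97 : Int) :: r) (((pre'.length + 1 : Nat) : Int) - 1) 0 = y := by
        rw [hcast, PySem.List.pyGetD_natCast, hassoc, getD_append_length]
      simp only [hG2]
      have hS2 : PySem.List.pySetD ((pre' ++ [y]) ++ (97 : Int) :: r) (((pre'.length + 1 : Nat) : Int) - 1) (y + 1)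
          = pre' ++ (y + 1) :: (97 : Int) :: r := by
        rw [hcast, PySem.List.pySetD_natCast, hassoc, set_append_length]
      simp only [hS2]
      have hG3 : PySem.List.pyGetD (pre' ++ (y + 1) :: (97 : Int) :: r) ((pre'.length + 1 : Nat) : Int) 0 = 97 := by
        rw [PySem.List.pyGetD_natCast,
            show pre' ++ (y + 1) :: (97 : Int) :: r = (pre' ++ [y + 1]) ++ (97 : Int) :: r by simp,
            show ((pre'.length + 1 : Nat)) = (pre' ++ [y + 1]).length by simp,
            getD_append_length]
      simp only [hG3]
      simp only [show INVALID_NUMS.contains (97 : Int) = false by decide, Bool.false_eq_true, if_false]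
      have hfc : fcore (x :: suf) = (1, 97 :: r) := by
        simp only [fcore]; rw [← hc, ← hr, if_pos hgt]
      have := ih y (x :: suf)
      rw [hfc] at this
      simp only at this
      rw [this]
      simp
    · rw [if_neg hgt]
      simp only [hG1]
      by_cases hinv : INVALID_NUMS.contains (x + c)
      · rw [if_pos hinv]
        have hS1 : PySem.List.pySetD ((pre' ++ [y]) ++ (x + c) :: r) ((pre'.length + 1 : Nat) : Int) (x + c + 1)
            = (pre' ++ [y]) ++ (x + c + 1) :: r := by
          rw [PySem.List.pySetD_natCast, ← hL, set_append_length]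
        simp only [hS1]
        rw [show ((pre'.length + 1 : Nat) : Int) + 1 = ((pre'.length + 2 : Nat) : Int) by push_cast; ring]
        rw [reset_chars_spec _ (pre'.length + 2) (by simp)]
        have hlen2 : ((pre' ++ [y]) ++ (x + c + 1) :: r).length = pre'.length + 2 + r.length := by simp; omega
        rw [hlen2]
        rw [show ((pre' ++ [y]) ++ (x + c + 1) :: r).take (pre'.length + 2)
              = (pre' ++ [y]) ++ [x + c + 1] from by
          rw [show pre'.length + 2 = (pre' ++ [y]).length + 1 by simp]
          exact take_append_succ _ _ _]
        rw [show pre'.length + 2 + r.length - (pre'.length + 2) = r.length by omega]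
        have hfc : fcore (x :: suf) = (0, (x + c + 1) :: List.replicate r.length (97 : Int)) := by
          simp only [fcore]; rw [← hc, ← hr, if_neg hgt, if_pos (by simpa [INVALID_NUMS] using hinv)]
          simp [List.map_const']
        have := ih y (x :: suf)
        rw [hfc] at this
        simp only at this
        rw [show (pre' ++ [y]) ++ [x + c + 1] ++ List.replicate r.length (97 : Int)
              = pre' ++ (y + 0) :: ((x + c + 1) :: List.replicate r.length (97 : Int)) by simp]
        rw [show (y : Int) + 0 = y + (0 : Int) from rfl] at this
        rw [this]
        simp
      · simp only [Bool.not_eq_true] at hinv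
        simp only [hinv, Bool.false_eq_true, if_false]
        have hfc : fcore (x :: suf) = (0, (x + c) :: r) := by
          simp only [fcore]; rw [← hc, ← hr, if_neg hgt, if_neg (by simpa [INVALID_NUMS] using hinv)]
        have := ih y (x :: suf)
        rw [hfc] at this
        simp only at this
        rw [show (pre' ++ [y]) ++ (x + c) :: r = pre' ++ (y + 0) :: ((x + c) :: r) by simp]
        rw [this]
        simp

theorem update_string_char (a : List Int) :
    update_string a =
      (if (fcore a).1 = 0 then (fcore a).2
       else PySem.List.pySetD (fcore a).2 (-1) (PySem.List.pyGetD (fcore a).2 (-1) 0 + 1)) := by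
  induction a using List.reverseRecOn with
  | nil => simp [update_string, update_string_loop, fcore]
  | append_singleton pre x _ =>
    unfold update_string
    rw [show (pre ++ [x]).length = pre.length + 1 by simp]
    have h := loopA_sim pre x []
    simp only [fcore, List.append_nil] at h
    norm_num at h
    exact h

theorem tight_test (a : List Int) (hD : D_update_string a) :
    update_string a ≠ (fcore a).2 := by
  have hne : a ≠ [] := by
    intro h; rw [h] at hD; simp [D_update_string] at hD
  have hrne : (fcore a).2 ≠ [] := by
    intro h
    have := fcore_length a
    rw [h] at this
    exact hne (List.eq_nil_of_length_eq_zero this.symm)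
  have h1 : (fcore a).1 = 1 := (fcore_carry_iff a).2 hD
  rw [update_string_char a, if_neg (by omega)]
  rw [pySetD_neg_one _ hrne]
  simp only [PySem.List.pyGetD_neg_one _ _ hrne]
  generalize hgen : (fcore a).2 = r at hrne ⊢
  intro heq
  have hlt : r.length - 1 < r.length := by
    have := List.length_pos_iff.mpr hrne; omega
  have h2 : (r.set (r.length - 1) (r.getLast hrne + 1))[r.length - 1]'(by simpa using hlt)
      = r.getLast hrne + 1 := List.getElem_set_self _
  simp only [heq] at h2
  rw [← List.getLast_eq_getElem hrne] at h2
  omega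

theorem alt_eq_fcore (a : List Int) : update_string_alt a = (fcore a).2 :=
  (foldB_eq_fcore a).1

-- ===== VERDICT (by name: the statement is the Claim_ definition above) =====
theorem update_string_spec : Claim_unchanged_update_string := by
  intro a _ hD
  rw [update_string_char a, alt_eq_fcore a]
  have h0 : (fcore a).1 = 0 := by
    rcases fcore_carry01 a with h | h
    · exact h
    · exact absurd ((fcore_carry_iff a).1 h) hD
  simp [h0]

theorem update_string_changed : Claim_changed_update_string := by
  unfold Claim_changed_update_string; decide

theorem update_string_tight : Claim_exact_update_string := by
  intro a _ hD
  rw [alt_eq_fcore a]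
  exact tight_test a hD
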